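-- pv_equiv track=rewrite | github.com/sgarrow/serpentine | serpSort.py | genSerpSearchCriteriaLst
-- ===== SOURCE A (Python) =====
-- def genSerpSearchCriteriaLst(minMaxLst):
--     import math
--
--     diffs       = [b-a+1 for a,b in minMaxLst]
--     numToGen    = math.prod(diffs)
--     should      = ['inc'] * len(minMaxLst)
--     currVals    = [x[0] for x in minMaxLst]
--     serpSrchLst = []
--
--     while len(serpSrchLst) < numToGen:
--
--         serpSrchLst.append(currVals[:]) # <-- the ':' fixed a bug.
--
--         for idx in range(len(currVals)-1, -1, -1):
--             if should[idx] == 'inc':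
--                 currVals[idx] += 1
--                 if currVals[idx]  > minMaxLst[idx][1]:
--                     currVals[idx] = minMaxLst[idx][1]
--                     should[idx] = 'dec'
--                     continue
--
--             if should[idx] == 'dec':
--                 currVals[idx] -= 1
--                 if currVals[idx]  < minMaxLst[idx][0]:
--                     currVals[idx] = minMaxLst[idx][0]
--                     should[idx] = 'inc'
--                     continue
--
--             break
--
--     return serpSrchLst
-- ===== SOURCE B (Python) =====
-- # B: recursive boustrophedon product -- build the serpentine enumeration of the tail
-- # grid once, then prepend each head value, reversing the tail block on every other
-- # row; no direction-flag state, no odometer stepping. A grid with an empty axis has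
-- # an empty enumeration.
-- def genSerpSearchCriteriaLst(minMaxLst):
--     if any(b < a for a, b in minMaxLst):
--         return []
--     return _serp(minMaxLst)
--
-- def _serp(mm):
--     if not mm:
--         return [[]]
--     (a, b) = mm[0]
--     tail = _serp(mm[1:])
--     out = []
--     for k in range(b - a + 1):
--         block = tail if k % 2 == 0 else tail[::-1]
--         for row in block:
--             out.append([a + k] + row)
--     return out
-- ===== Notes on version B (the rewrite author's own statement) =====
-- stated objective: alternative
-- what changed: Replaced the stateful odometer walk (mutable currVals with per-axis inc/dec direction flags stepped once per output row) by a recursive boustrophedon product: build the serpentine enumeration of the tail grid once, then for each head value prepend it to the tail block, reversing the block on every other row; no direction state at all.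
-- intended difference: On inputs where some range is empty (b < a) yet the product of the (b-a+1) widths is still positive, A returns spurious rows starting at the per-axis minimums (points that lie in no range), while B returns the empty enumeration, which is the intended result for a grid with an empty axis. — e.g. on genSerpSearchCriteriaLst([(0, -2), (0, -2)]): A returns [[0, 0]], B returns []
import Mathlib
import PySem

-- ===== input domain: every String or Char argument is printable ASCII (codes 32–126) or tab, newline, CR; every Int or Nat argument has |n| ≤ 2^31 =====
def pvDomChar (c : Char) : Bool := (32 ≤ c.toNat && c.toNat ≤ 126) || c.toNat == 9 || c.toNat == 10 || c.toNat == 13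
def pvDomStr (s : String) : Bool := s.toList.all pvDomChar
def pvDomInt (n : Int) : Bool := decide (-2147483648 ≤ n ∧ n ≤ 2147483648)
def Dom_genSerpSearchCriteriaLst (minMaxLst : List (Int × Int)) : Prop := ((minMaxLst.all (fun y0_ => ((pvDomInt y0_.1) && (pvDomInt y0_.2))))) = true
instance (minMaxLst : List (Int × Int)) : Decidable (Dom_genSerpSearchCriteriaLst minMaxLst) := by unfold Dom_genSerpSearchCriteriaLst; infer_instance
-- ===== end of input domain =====

-- B replaces A's stateful odometer (mutable currVals + per-axis inc/dec flags) by a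
-- recursive boustrophedon product: build the tail grid's serpentine list once and
-- prepend each head value, reversing the tail block on every other row ("alternative").
-- Intended difference (D_ below): when some range is empty (b < a) but the product of
-- the widths is still positive, A returns spurious rows; B returns the empty enumeration.

-- ===== PORT A =====
-- inner `for idx in range(len(currVals)-1, -1, -1)` loop with its break/continue,
-- as a structural recursion that (like Python) handles the LAST axis first; the
-- Bool is the `continue`-past-this-axis carry (true = loop moved on / fell off the front).
def pvStepA : List (Int × Int) → List Int → List String → List Int × List String × Bool
  | (ab) :: mmRest, v :: vs, s :: ss =>
      let r := pvStepA mmRest vs ss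
      if r.2.2 then
        if s = "inc" then
          (if v + 1 > ab.2 then (ab.2 :: r.1, "dec" :: r.2.1, true)
           else ((v + 1) :: r.1, s :: r.2.1, false))
        else
          (if v - 1 < ab.1 then (ab.1 :: r.1, "inc" :: r.2.1, true)
           else ((v - 1) :: r.1, s :: r.2.1, false))
      else (v :: r.1, s :: r.2.1, false)
  | _, _, _ => ([], [], true)

-- `while len(serpSrchLst) < numToGen:` — each iteration appends exactly one row,
-- so the loop runs max(numToGen,0) times; fuel = that count.
def pvLoopA (mm : List (Int × Int)) : Nat → List Int → List String → List (List Int) → List (List Int)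
  | 0, _, _, acc => acc
  | fuel + 1, vals, should, acc =>
      let r := pvStepA mm vals should
      pvLoopA mm fuel r.1 r.2.1 (acc ++ [vals])

def genSerpSearchCriteriaLst (minMaxLst : List (Int × Int)) : List (List Int) :=
  let diffs := minMaxLst.map (fun p => p.2 - p.1 + 1)
  let numToGen := diffs.foldl (· * ·) 1
  let should := List.replicate minMaxLst.length "inc"
  let currVals := minMaxLst.map (fun x => x.1)
  pvLoopA minMaxLst numToGen.toNat currVals should []

-- ===== PORT B =====
def pvSerp : List (Int × Int) → List (List Int)
  | [] => [[]]
  | (a, b) :: rest =>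
      let tail := pvSerp rest
      (List.range (b - a + 1).toNat).foldl
        (fun (out : List (List Int)) (k : Nat) =>
          out ++ (if k % 2 = 0 then tail else tail.reverse).map (fun row => (a + (k : Int)) :: row))
        []

def genSerpSearchCriteriaLst_alt (minMaxLst : List (Int × Int)) : List (List Int) :=
  if minMaxLst.any (fun p => p.2 < p.1) then [] else pvSerp minMaxLst

-- ===== PRECONDITION & SPEC =====
-- On inputs where some range is empty (b < a) yet the product of the (b-a+1) widths is
-- still positive, A returns spurious rows starting at the per-axis minimums (points in no
-- range), while B returns the empty enumeration — the intended result for an empty grid.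
def D_genSerpSearchCriteriaLst (minMaxLst : List (Int × Int)) : Prop :=
  (∃ p ∈ minMaxLst, p.2 < p.1) ∧ 0 < (minMaxLst.map (fun p => p.2 - p.1 + 1)).prod
instance (minMaxLst : List (Int × Int)) : Decidable (D_genSerpSearchCriteriaLst minMaxLst) := by
  unfold D_genSerpSearchCriteriaLst; infer_instance

def Spec_genSerpSearchCriteriaLst (minMaxLst : List (Int × Int)) (out : List (List Int)) : Prop :=
  ¬ D_genSerpSearchCriteriaLst minMaxLst → out = genSerpSearchCriteriaLst_alt minMaxLst
instance (minMaxLst : List (Int × Int)) (out : List (List Int)) : Decidable (Spec_genSerpSearchCriteriaLst minMaxLst out) := by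
  unfold Spec_genSerpSearchCriteriaLst; infer_instance

def pvDiffWitness_genSerpSearchCriteriaLst : (List (Int × Int)) := [(0, -2), (0, -2)]
def pvDiffWitnessOut_genSerpSearchCriteriaLst : (List (List Int)) × (List (List Int)) := ([[0, 0]], [])

-- ===== CLAIM (what is proved, stated in full; the proofs are below) =====
def Claim_unchanged_genSerpSearchCriteriaLst : Prop := ∀ (minMaxLst : List (Int × Int)), Dom_genSerpSearchCriteriaLst minMaxLst → Spec_genSerpSearchCriteriaLst minMaxLst (genSerpSearchCriteriaLst minMaxLst)
def Claim_changed_genSerpSearchCriteriaLst : Prop := Dom_genSerpSearchCriteriaLst (pvDiffWitness_genSerpSearchCriteriaLst) ∧ D_genSerpSearchCriteriaLst (pvDiffWitness_genSerpSearchCriteriaLst) ∧ genSerpSearchCriteriaLst (pvDiffWitness_genSerpSearchCriteriaLst) = pvDiffWitnessOut_genSerpSearchCriteriaLst.1 ∧ genSerpSearchCriteriaLst_alt (pvDiffWitness_genSerpSearchCriteriaLst) = pvDiffWitnessOut_genSerpSearchCriteriaLst.2 ∧ pvDiffWitnessOut_genSerpSearchCriteriaLst.1 ≠ pvDiffWi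tnessOut_genSerpSearchCriteriaLst.2
def Claim_exact_genSerpSearchCriteriaLst : Prop := ∀ (minMaxLst : List (Int × Int)), Dom_genSerpSearchCriteriaLst minMaxLst → D_genSerpSearchCriteriaLst minMaxLst → genSerpSearchCriteriaLst minMaxLst ≠ genSerpSearchCriteriaLst_alt minMaxLst

-- ===== LEMMAS AND PROOFS =====

-- proof-side vocabulary ------------------------------------------------------
def pvFlipF (s : String) : String := if s = "inc" then "dec" else "inc"
def pvFlipS (l : List String) : List String := l.map pvFlipF
def pvFlipP (p : List Int × List String) : List Int × List String := (p.1, pvFlipS p.2)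
def pvFlipRev (L : List (List Int × List String)) : List (List Int × List String) :=
  L.reverse.map pvFlipP

def pvDeco (v : Int) (f : String) (p : List Int × List String) : List Int × List String :=
  (v :: p.1, f :: p.2)

def pvGlue (n : Nat) (v : Nat → Int) (f : String) (B : Nat → List (List Int × List String)) :
    List (List Int × List String) :=
  (List.range n).flatMap (fun k => (B k).map (pvDeco (v k) f))

def pvAlt (T : List (List Int × List String)) (k : Nat) : List (List Int × List String) :=
  if k % 2 = 0 then T else pvFlipRev T

-- the decorated serpentine path: rows together with the inc/dec flag vector A holds at that row
def pvPath : List (Int × Int) → List (List Int × List String)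
  | [] => [([], [])]
  | (a, b) :: rest =>
      pvGlue (b - a + 1).toNat (fun k => a + (k : Int)) "inc" (pvAlt (pvPath rest))

def pvValid (mm : List (Int × Int)) : Prop := ∀ p ∈ mm, p.1 ≤ p.2

def pvRstep (mm : List (Int × Int)) (p q : List Int × List String) : Prop :=
  pvStepA mm p.1 p.2 = (q.1, q.2, false)

def pvLastOk (mm : List (Int × Int)) (L : List (List Int × List String)) : Prop :=
  ∀ p, L.getLast? = some p → pvStepA mm p.1 p.2 = (p.1, pvFlipS p.2, true)

def pvGood (mm : List (Int × Int)) (L : List (List Int × List String)) : Prop :=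
  L ≠ [] ∧ List.IsChain (pvRstep mm) L ∧ pvLastOk mm L

def pvFlagsOk (L : List (List Int × List String)) : Prop :=
  ∀ p ∈ L, ∀ s ∈ p.2, s = "inc" ∨ s = "dec"

-- basic flip facts
theorem pvFlipF_flipF {s : String} (h : s = "inc" ∨ s = "dec") : pvFlipF (pvFlipF s) = s := by
  rcases h with h | h <;> simp [pvFlipF, h]

theorem pvFlipS_flipS {l : List String} (h : ∀ s ∈ l, s = "inc" ∨ s = "dec") :
    pvFlipS (pvFlipS l) = l := by
    induction l with
  | nil => simp [pvFlipS]
  | cons x t ih =>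
    have hx := h x (by simp)
    have ht := ih (fun s hs => h s (by simp [hs]))
    simpa [pvFlipS, pvFlipF_flipF hx] using congrArg id ht

theorem pvFlipRev_flipRev {L : List (List Int × List String)} (h : pvFlagsOk L) :
    pvFlipRev (pvFlipRev L) = L := by
  simp only [pvFlipRev, List.map_reverse, List.reverse_reverse, List.map_map]
  have : ∀ p ∈ L, (pvFlipP ∘ pvFlipP) p = p := by
    intro p hp
    have := pvFlipS_flipS (l := p.2) (h p hp)
    simp [pvFlipP, Function.comp, this]
  calc L.map (pvFlipP ∘ pvFlipP) = L.map id := List.map_congr_left this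
    _ = L := List.map_id L

theorem pvFlagsOk_flipRev (L : List (List Int × List String)) (_h : pvFlagsOk L) :
    pvFlagsOk (pvFlipRev L) := by
  intro p hp s hs
  simp only [pvFlipRev, List.mem_map, List.mem_reverse] at hp
  obtain ⟨q, hq, rfl⟩ := hp
  simp only [pvFlipP] at hs
  simp only [pvFlipS, List.mem_map] at hs
  obtain ⟨t, ht, rfl⟩ := hs
  by_cases h : t = "inc" <;> simp [pvFlipF, h]

-- reverse of a range
theorem pvReverse_range (n : Nat) :
    (List.range n).reverse = (List.range n).map (fun i => n - 1 - i) := by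
  apply List.ext_getElem
  · simp
  · intro i h1 h2
    simp only [List.getElem_reverse, List.getElem_map, List.getElem_range, List.length_range]

theorem pvReverse_flatMap {α β : Type} (f : α → List β) (l : List α) :
    (l.flatMap f).reverse = l.reverse.flatMap (fun x => (f x).reverse) := by
  simp only [List.flatMap, List.reverse_flatten, List.map_reverse, List.map_map]
  rfl

-- flipRev of a glue
theorem pvFlipRev_glue (n : Nat) (v : Nat → Int) (f : String)
    (B : Nat → List (List Int × List String)) :
    pvFlipRev (pvGlue n v f B) =
      pvGlue n (fun j => v (n - 1 - j)) (pvFlipF f) (fun j => pvFlipRev (B (n - 1 - j))) := by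
  unfold pvFlipRev pvGlue
  rw [pvReverse_flatMap, List.map_flatMap, pvReverse_range, List.flatMap_map]
  apply List.flatMap_congr
  intro k hk
  simp only [List.map_reverse, List.map_map]
  congr 1

-- head and last of a glue
theorem pvGlue_head (n : Nat) (v : Nat → Int) (f : String)
    (B : Nat → List (List Int × List String)) (hn : 1 ≤ n) (h0 : B 0 ≠ []) :
    (pvGlue n v f B).head? = (B 0).head?.map (pvDeco (v 0) f) := by
  cases n with
  | zero => omega
  | succ m =>
    rw [pvGlue, List.head?_flatMap, List.range_succ_eq_map]
    rw [List.findSome?_cons]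
    rw [List.head?_map]
    cases hB : (B 0).head? with
    | none => exact absurd (List.head?_eq_none_iff.mp hB) h0
    | some p => simp

theorem pvGlue_last (n : Nat) (v : Nat → Int) (f : String)
    (B : Nat → List (List Int × List String)) (hn : 1 ≤ n) (h : B (n - 1) ≠ []) :
    (pvGlue n v f B).getLast? = ((B (n - 1)).getLast?).map (pvDeco (v (n - 1)) f) := by
  cases n with
  | zero => omega
  | succ m =>
    rw [pvGlue, List.getLast?_flatMap, List.range_succ, List.reverse_append]
    simp only [List.reverse_singleton, List.singleton_append, List.findSome?_cons]
    rw [List.getLast?_map]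
    simp only [Nat.succ_sub_one] at h ⊢
    cases hB : (B m).getLast? with
    | none => exact absurd (List.getLast?_eq_none_iff.mp hB) h
    | some p => simp

-- how one A-step acts on a decorated state
theorem pvStep_deco (a b w : Int) (f : String) (rest : List (Int × Int))
    (p q : List Int × List String) (h : pvStepA rest p.1 p.2 = (q.1, q.2, false)) :
    pvStepA ((a, b) :: rest) (w :: p.1) (f :: p.2) = (w :: q.1, f :: q.2, false) := by
  simp [pvStepA, h]

theorem pvStep_carry_inc_mid (a b w : Int) (rest : List (Int × Int)) (p : List Int × List String)
    (h : pvStepA rest p.1 p.2 = (p.1, pvFlipS p.2, true)) (hle : w + 1 ≤ b) :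
    pvStepA ((a, b) :: rest) (w :: p.1) ("inc" :: p.2) = ((w + 1) :: p.1, "inc" :: pvFlipS p.2, false) := by
  simp [pvStepA, h, show ¬(w + 1 > b) from by omega]

theorem pvStep_carry_dec_mid (a b w : Int) (rest : List (Int × Int)) (p : List Int × List String)
    (h : pvStepA rest p.1 p.2 = (p.1, pvFlipS p.2, true)) (hle : a ≤ w - 1) :
    pvStepA ((a, b) :: rest) (w :: p.1) ("dec" :: p.2) = ((w - 1) :: p.1, "dec" :: pvFlipS p.2, false) := by
  simp [pvStepA, h, show ¬(w - 1 < a) from by omega]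

theorem pvStep_carry_inc_end (a b : Int) (rest : List (Int × Int)) (p : List Int × List String)
    (h : pvStepA rest p.1 p.2 = (p.1, pvFlipS p.2, true)) :
    pvStepA ((a, b) :: rest) (b :: p.1) ("inc" :: p.2) = (b :: p.1, "dec" :: pvFlipS p.2, true) := by
  simp [pvStepA, h, show b + 1 > b from by omega]

theorem pvStep_carry_dec_end (a b : Int) (rest : List (Int × Int)) (p : List Int × List String)
    (h : pvStepA rest p.1 p.2 = (p.1, pvFlipS p.2, true)) :
    pvStepA ((a, b) :: rest) (a :: p.1) ("dec" :: p.2) = (a :: p.1, "inc" :: pvFlipS p.2, true) := by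
  simp [pvStepA, h, show a - 1 < a from by omega]

theorem pvGlue_succ (m : Nat) (v : Nat → Int) (f : String) (B : Nat → List (List Int × List String)) :
    pvGlue (m + 1) v f B = pvGlue m v f B ++ (B m).map (pvDeco (v m) f) := by
  rw [pvGlue, List.range_succ, List.flatMap_append]
  simp [pvGlue]

theorem pvFlipRev_head (L : List (List Int × List String)) :
    (pvFlipRev L).head? = L.getLast?.map pvFlipP := by
  simp [pvFlipRev, List.head?_reverse]

-- the core composition lemma
theorem pvGood_glue (a b : Int) (rest : List (Int × Int)) (n : Nat) (hn : 1 ≤ n)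
    (v : Nat → Int) (f : String) (B : Nat → List (List Int × List String))
    (hB : ∀ k, k + 1 < n → B (k + 1) = pvFlipRev (B k))
    (hG : ∀ k, k < n → pvGood rest (B k))
    (hf : f = "inc" ∨ f = "dec")
    (hmid : ∀ k, k + 1 < n →
        v (k + 1) = (if f = "inc" then v k + 1 else v k - 1) ∧
        (if f = "inc" then v k + 1 ≤ b else a ≤ v k - 1))
    (hend : v (n - 1) = (if f = "inc" then b else a)) :
    pvGood ((a, b) :: rest) (pvGlue n v f B) := by
  have hBne : ∀ k, k < n → B k ≠ [] := fun k hk => (hG k hk).1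
  have hlink : ∀ m, 0 < m → m < n → ∀ x ∈ (pvGlue m v f B).getLast?,
      ∀ y ∈ ((B m).map (pvDeco (v m) f)).head?, pvRstep ((a, b) :: rest) x y := by
    intro m hm hmn x hx y hy
    rw [pvGlue_last m v f B hm (hBne (m - 1) (by omega))] at hx
    cases hL : (B (m - 1)).getLast? with
    | none => rw [hL] at hx; simp at hx
    | some p =>
      rw [hL] at hx
      simp at hx
      have hBm : B m = pvFlipRev (B (m - 1)) := by
        have := hB (m - 1) (by omega)
        simpa [Nat.sub_add_cancel hm] using this
      rw [List.head?_map, hBm, pvFlipRev_head, hL] at hy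
      simp at hy
      have hcarry : pvStepA rest p.1 p.2 = (p.1, pvFlipS p.2, true) :=
        (hG (m - 1) (by omega)).2.2 p hL
      have hm1 : m - 1 + 1 = m := by omega
      have hmid' := hmid (m - 1) (by omega)
      rw [hm1] at hmid'
      subst hx; subst hy
      rcases hf with hf | hf <;> subst hf <;> simp at hmid'
      · have := pvStep_carry_inc_mid a b (v (m - 1)) rest p hcarry hmid'.2
        simp [pvRstep, pvDeco, pvFlipP, this, hmid'.1]
      · have := pvStep_carry_dec_mid a b (v (m - 1)) rest p hcarry (by omega)
        simp [pvRstep, pvDeco, pvFlipP, this, hmid'.1]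
  have hchain : ∀ m, m ≤ n → List.IsChain (pvRstep ((a, b) :: rest)) (pvGlue m v f B) := by
    intro m
    induction m with
    | zero => intro _; simp [pvGlue]
    | succ k ih =>
      intro hk1
      rw [pvGlue_succ]
      rw [List.isChain_append]
      refine ⟨ih (by omega), ?_, ?_⟩
      · rw [List.isChain_map]
        exact ((hG k (by omega)).2.1).imp (fun {p q} h => pvStep_deco a b (v k) f rest p q h)
      · rcases Nat.eq_zero_or_pos k with rfl | hkpos
        · simp [pvGlue]
        · exact hlink k hkpos (by omega)
  refine ⟨?_, hchain n le_rfl, ?_⟩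
  · intro hnil
    have := pvGlue_head n v f B hn (hBne 0 (by omega))
    rw [hnil] at this
    cases hB0 : (B 0).head? with
    | none => exact (hBne 0 (by omega)) (List.head?_eq_none_iff.mp hB0)
    | some p => rw [hB0] at this; simp at this
  · intro q hq
    rw [pvGlue_last n v f B hn (hBne (n - 1) (by omega))] at hq
    cases hL : (B (n - 1)).getLast? with
    | none => rw [hL] at hq; simp at hq
    | some p =>
      rw [hL] at hq
      simp at hq
      have hcarry : pvStepA rest p.1 p.2 = (p.1, pvFlipS p.2, true) :=
        (hG (n - 1) (by omega)).2.2 p hL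
      subst hq
      rcases hf with hf | hf <;> subst hf <;> simp at hend
      · have := pvStep_carry_inc_end a b rest p hcarry
        simp only [pvDeco]
        rw [hend, this]
        simp [pvFlipS, pvFlipF]
      · have := pvStep_carry_dec_end a b rest p hcarry
        simp only [pvDeco]
        rw [hend, this]
        simp [pvFlipS, pvFlipF]

-- main induction: the decorated path is Good in both directions, with clean flags
theorem pvGood_path (mm : List (Int × Int)) (hv : pvValid mm) :
    pvGood mm (pvPath mm) ∧ pvGood mm (pvFlipRev (pvPath mm)) ∧ pvFlagsOk (pvPath mm) := by
  induction mm with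
  | nil =>
    refine ⟨⟨by simp [pvPath], by simp [pvPath], ?_⟩, ⟨by simp [pvPath, pvFlipRev], ?_, ?_⟩, ?_⟩
    · intro p hp
      simp [pvPath] at hp
      subst hp
      rfl
    · simp [pvPath, pvFlipRev, pvFlipP, pvFlipS]
    · intro p hp
      simp [pvPath, pvFlipRev, pvFlipP, pvFlipS] at hp
      subst hp
      rfl
    · intro p hp s hs
      simp [pvPath] at hp
      subst hp
      simp at hs
  | cons hd rest ih =>
    obtain ⟨a, b⟩ := hd
    have hab : a ≤ b := hv (a, b) (by simp)
    have hvr : pvValid rest := fun p hp => hv p (by simp [hp])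
    obtain ⟨GT, GFT, FlT⟩ := ih hvr
    set T := pvPath rest with hT
    have hn : 1 ≤ (b - a + 1).toNat := by omega
    have hAltGood : ∀ k, pvGood rest (pvAlt T k) := by
      intro k; unfold pvAlt; split
      · exact GT
      · exact GFT
    have hAltFlags : ∀ k, pvFlagsOk (pvAlt T k) := by
      intro k; unfold pvAlt; split
      · exact FlT
      · exact pvFlagsOk_flipRev T FlT
    have hAltSucc : ∀ k, pvAlt T (k + 1) = pvFlipRev (pvAlt T k) := by
      intro k; unfold pvAlt
      by_cases h : k % 2 = 0
      · have h1 : (k + 1) % 2 ≠ 0 := by omega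
        simp [h, h1]
      · have h1 : (k + 1) % 2 = 0 := by omega
        simp [h, h1, pvFlipRev_flipRev FlT]
    have hGoodFwd : pvGood ((a, b) :: rest) (pvPath ((a, b) :: rest)) := by
      show pvGood _ (pvGlue (b - a + 1).toNat (fun k => a + (k : Int)) "inc" (pvAlt T))
      apply pvGood_glue a b rest _ hn _ _ _ (fun k _ => hAltSucc k) (fun k _ => hAltGood k)
        (Or.inl rfl)
      · intro k hk
        simp only [reduceIte]
        constructor
        · push_cast; ring
        · omega
      · simp only [reduceIte]
        omega
    refine ⟨hGoodFwd, ?_, ?_⟩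
    · show pvGood _ (pvFlipRev (pvGlue (b - a + 1).toNat (fun k => a + (k : Int)) "inc" (pvAlt T)))
      rw [pvFlipRev_glue]
      have hflipf : pvFlipF "inc" = "dec" := rfl
      rw [hflipf]
      apply pvGood_glue a b rest _ hn _ _ _ ?_ ?_ (Or.inr rfl) ?_ ?_
      · intro k hk
        have he : (b - a + 1).toNat - 1 - (k + 1) = (b - a + 1).toNat - 2 - k := by omega
        have hm : (b - a + 1).toNat - 1 - k = ((b - a + 1).toNat - 2 - k) + 1 := by omega
        rw [he, pvFlipRev_flipRev (hAltFlags _), hm, hAltSucc]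
      · intro k _
        unfold pvAlt; split
        · exact GFT
        · rw [pvFlipRev_flipRev FlT]; exact GT
      · intro k hk
        simp only [reduceIte, String.reduceEq]
        constructor
        · have h1 : (b - a + 1).toNat - 1 - (k + 1) = ((b - a + 1).toNat - 1 - k) - 1 := by omega
          rw [h1]
          omega
        · omega
      · simp only [reduceIte, String.reduceEq]
        omega
    · intro p hp s hs
      simp only [pvPath, pvGlue, List.mem_flatMap, List.mem_map] at hp
      obtain ⟨k, _, q, hq, rfl⟩ := hp
      simp only [pvDeco, List.mem_cons] at hs
      rcases hs with rfl | hs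
      · exact Or.inl rfl
      · exact hAltFlags k q hq s hs

theorem pvPath_head (mm : List (Int × Int)) (hv : pvValid mm) :
    (pvPath mm).head? = some (mm.map (fun x => x.1), mm.map (fun _ => "inc")) := by
  induction mm with
  | nil => simp [pvPath]
  | cons hd rest ih =>
    obtain ⟨a, b⟩ := hd
    have hab : a ≤ b := hv (a, b) (by simp)
    have hvr : pvValid rest := fun p hp => hv p (by simp [hp])
    obtain ⟨⟨hTne, _, _⟩, _, _⟩ := pvGood_path rest hvr
    have hn : 1 ≤ (b - a + 1).toNat := by omega
    have h0 : pvAlt (pvPath rest) 0 = pvPath rest := by simp [pvAlt]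
    show (pvGlue (b - a + 1).toNat (fun k => a + (k : Int)) "inc" (pvAlt (pvPath rest))).head? = _
    rw [pvGlue_head _ _ _ _ hn (by rw [h0]; exact hTne), h0, ih hvr]
    simp [pvDeco]

theorem pvPath_length (mm : List (Int × Int)) (hv : pvValid mm) :
    ((pvPath mm).length : Int) = (mm.map (fun p => p.2 - p.1 + 1)).prod := by
  induction mm with
  | nil => simp [pvPath]
  | cons hd rest ih =>
    obtain ⟨a, b⟩ := hd
    have hab : a ≤ b := hv (a, b) (by simp)
    have hvr : pvValid rest := fun p hp => hv p (by simp [hp])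
    have hlen : ∀ k, (pvAlt (pvPath rest) k).length = (pvPath rest).length := by
      intro k; unfold pvAlt; split
      · rfl
      · simp [pvFlipRev]
    show ((pvGlue (b - a + 1).toNat (fun k => a + (k : Int)) "inc" (pvAlt (pvPath rest))).length : Int) = _
    have : (pvGlue (b - a + 1).toNat (fun k => a + (k : Int)) "inc" (pvAlt (pvPath rest))).length =
        (b - a + 1).toNat * (pvPath rest).length := by
      simp only [pvGlue, List.length_flatMap, List.length_map]
      rw [List.map_congr_left
        (fun k _ => hlen k : ∀ k ∈ List.range (b - a + 1).toNat,
          (pvAlt (pvPath rest) k).length = (fun _ => (pvPath rest).length) k)]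
      simp [List.map_const', List.sum_replicate]
    rw [this]
    have hcast : (((b - a + 1).toNat * (pvPath rest).length : Nat) : Int) =
        ((b - a + 1).toNat : Int) * ((pvPath rest).length : Int) := by push_cast; ring
    rw [hcast, ih hvr]
    have hn' : (((b - a + 1).toNat : Nat) : Int) = b - a + 1 := by omega
    rw [hn']
    simp

theorem pvMap_fst_path (mm : List (Int × Int)) :
    (pvPath mm).map Prod.fst = pvSerp mm := by
  induction mm with
  | nil => simp [pvPath, pvSerp]
  | cons hd rest ih =>
    obtain ⟨a, b⟩ := hd
    simp only [pvPath, pvSerp]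
    rw [PySem.List.foldl_append_eq_flatMap]
    rw [List.nil_append]
    simp only [pvGlue, List.map_flatMap]
    apply List.flatMap_congr
    intro k hk
    rw [← ih]
    by_cases hpar : k % 2 = 0
    · simp [pvAlt, hpar, pvDeco, List.map_map, Function.comp]
    · simp only [pvAlt, if_neg hpar]
      simp only [pvFlipRev, List.map_map]
      simp [pvDeco, pvFlipP, Function.comp, List.map_reverse]

-- running A's loop along a chain of states
theorem pvRun (mm : List (Int × Int)) (L : List (List Int × List String)) (vals : List Int)
    (should : List String) (acc : List (List Int))
    (hhead : L.head? = some (vals, should)) (hchain : List.IsChain (pvRstep mm) L) :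
    pvLoopA mm L.length vals should acc = acc ++ L.map Prod.fst := by
  induction L generalizing vals should acc with
  | nil => simp at hhead
  | cons x t ih =>
    cases t with
    | nil =>
      simp at hhead
      simp [pvLoopA]
      cases hhead; rfl
    | cons y t2 =>
      simp at hhead
      rw [List.isChain_cons_cons] at hchain
      obtain ⟨hxy, hchain2⟩ := hchain
      simp only [List.length_cons]
      have hx1 : x.1 = vals := by rw [hhead]
      have hx2 : x.2 = should := by rw [hhead]
      have hstep : pvStepA mm vals should = (y.1, y.2, false) := by
        rw [← hx1, ← hx2]; exact hxy
      have hone : pvLoopA mm (t2.length + 1 + 1) vals should acc =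
          pvLoopA mm (t2.length + 1) (pvStepA mm vals should).1 (pvStepA mm vals should).2.1 (acc ++ [vals]) := rfl
      rw [hone, hstep]
      have := ih y.1 y.2 (acc ++ [vals]) (by simp) hchain2
      simp only [List.length_cons] at this
      simp only []
      rw [this]
      simp [hx1]

theorem pvFoldl_mul (l : List Int) (x : Int) : List.foldl (· * ·) x l = x * l.prod := by
  induction l generalizing x with
  | nil => simp
  | cons a t ih => simp only [List.foldl, List.prod_cons]; rw [ih (x * a)]; ring

theorem pvLoopA_length (mm : List (Int × Int)) (fuel : Nat) (vals : List Int)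
    (should : List String) (acc : List (List Int)) :
    (pvLoopA mm fuel vals should acc).length = acc.length + fuel := by
  induction fuel generalizing vals should acc with
  | zero => simp [pvLoopA]
  | succ f ih => simp [pvLoopA, ih]; omega

theorem pvAlt_nil_of_empty_dim (mm : List (Int × Int)) (h : ∃ p ∈ mm, p.2 < p.1) :
    genSerpSearchCriteriaLst_alt mm = [] := by
  unfold genSerpSearchCriteriaLst_alt
  rw [if_pos]
  simp only [List.any_eq_true, decide_eq_true_eq]
  exact h

theorem pvEq_of_valid (mm : List (Int × Int)) (hv : pvValid mm) :
    genSerpSearchCriteriaLst mm = genSerpSearchCriteriaLst_alt mm := by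
  obtain ⟨⟨hne, hchain, _⟩, _, _⟩ := pvGood_path mm hv
  have hhead := pvPath_head mm hv
  have hlen := pvPath_length mm hv
  have hA : genSerpSearchCriteriaLst mm =
      pvLoopA mm (((mm.map fun (p : Int × Int) => p.2 - p.1 + 1).foldl (· * ·) 1).toNat)
        (mm.map fun x => x.1) (List.replicate mm.length "inc") [] := rfl
  have hrep : List.replicate mm.length "inc" = mm.map (fun _ => "inc") := by
    simp
  have hfuel : (((mm.map fun (p : Int × Int) => p.2 - p.1 + 1).foldl (· * ·) 1)).toNat = (pvPath mm).length := by
    rw [pvFoldl_mul, one_mul, ← hlen]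
    simp
  rw [hA, hrep, hfuel, pvRun mm (pvPath mm) _ _ [] hhead hchain]
  rw [pvMap_fst_path]
  unfold genSerpSearchCriteriaLst_alt
  rw [if_neg]
  · simp
  · simp only [List.any_eq_true, decide_eq_true_eq]
    rintro ⟨p, hp, hlt⟩
    exact absurd (hv p hp) (by omega)

-- ===== VERDICT (by name: the statement is the Claim_ definition above) =====
theorem genSerpSearchCriteriaLst_spec : Claim_unchanged_genSerpSearchCriteriaLst := by
  unfold Claim_unchanged_genSerpSearchCriteriaLst
  intro mm _
  unfold Spec_genSerpSearchCriteriaLst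
  intro hnd
  by_cases hval : pvValid mm
  · exact pvEq_of_valid mm hval
  · have hex : ∃ p ∈ mm, p.2 < p.1 := by
      unfold pvValid at hval
      push Not at hval
      obtain ⟨p, hp, hlt⟩ := hval
      exact ⟨p, hp, hlt⟩
    have hB := pvAlt_nil_of_empty_dim mm hex
    have hprod : (mm.map fun (p : Int × Int) => p.2 - p.1 + 1).prod ≤ 0 := by
      by_contra hc
      exact hnd ⟨hex, by omega⟩
    have hA : genSerpSearchCriteriaLst mm = [] := by
      have : (((mm.map fun (p : Int × Int) => p.2 - p.1 + 1).foldl (· * ·) 1)).toNat = 0 := by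
        rw [pvFoldl_mul, one_mul]; omega
      show pvLoopA mm (((mm.map fun (p : Int × Int) => p.2 - p.1 + 1).foldl (· * ·) 1).toNat)
        (mm.map fun x => x.1) (List.replicate mm.length "inc") [] = []
      rw [this]
      rfl
    rw [hA, hB]

theorem genSerpSearchCriteriaLst_changed : Claim_changed_genSerpSearchCriteriaLst := by
  unfold Claim_changed_genSerpSearchCriteriaLst; decide

theorem genSerpSearchCriteriaLst_tight : Claim_exact_genSerpSearchCriteriaLst := by
  unfold Claim_exact_genSerpSearchCriteriaLst
  intro mm _ hd heq
  obtain ⟨hex, hpos⟩ := hd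
  have hB := pvAlt_nil_of_empty_dim mm hex
  rw [hB] at heq
  have hA : genSerpSearchCriteriaLst mm =
      pvLoopA mm (((mm.map fun (p : Int × Int) => p.2 - p.1 + 1).foldl (· * ·) 1).toNat)
        (mm.map fun x => x.1) (List.replicate mm.length "inc") [] := rfl
  rw [hA] at heq
  have hlen := congrArg List.length heq
  rw [pvLoopA_length] at hlen
  simp at hlen
  rw [pvFoldl_mul, one_mul] at hlen
  omega
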